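-- pv_equiv track=rewrite | github.com/SnailPJW/NTUH-API-DEV | compile.py | _get_tag_from_line
-- ===== SOURCE A (Python) =====
-- def _get_tag_from_line(line):
--     assert isinstance(line, str)
--     buffer = ''
--     for chart in line:
--         if chart not in ' \t{%}':
--             buffer += chart
--         elif len(buffer):
--             break
--     return buffer
-- ===== SOURCE B (Python) =====
-- import re
--
-- _TOKEN_RE = re.compile(r'[^ \t{%}]+')
--
-- def _get_tag_from_line(line):
--     assert isinstance(line, str)
--     m = _TOKEN_RE.search(line)
--     return m.group() if m else ''
-- ===== Notes on version B (the rewrite author's own statement) =====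
-- stated objective: idiomatic
-- what changed: Replaced the explicit character-accumulating loop with break logic by a single regex search for the first maximal run of non-delimiter characters.
import Mathlib
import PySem

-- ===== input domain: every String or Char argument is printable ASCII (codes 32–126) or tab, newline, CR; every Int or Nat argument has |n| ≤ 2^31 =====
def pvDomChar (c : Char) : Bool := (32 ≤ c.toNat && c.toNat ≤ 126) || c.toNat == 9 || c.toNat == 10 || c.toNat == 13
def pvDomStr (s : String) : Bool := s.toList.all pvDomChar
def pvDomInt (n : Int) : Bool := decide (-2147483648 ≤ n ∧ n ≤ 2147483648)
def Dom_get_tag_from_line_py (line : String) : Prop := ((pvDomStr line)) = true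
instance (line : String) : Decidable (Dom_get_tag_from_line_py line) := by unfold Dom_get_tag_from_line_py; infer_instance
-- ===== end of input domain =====

-- B replaces A's accumulate-and-break loop by a regex search for the first maximal
-- run of non-delimiter characters (idiomatic; same cost).

-- the delimiter set ' \t{%}'
def pvDelim (c : Char) : Bool := c = ' ' || c = '\t' || c = '{' || c = '%' || c = '}'

-- ===== PORT A =====
-- loop: for chart in line: if chart not in ' \t{%}': buffer += chart elif len(buffer): break
def pvLoopA : List Char → List Char → List Char
  | [], buffer => buffer
  | c :: cs, buffer =>
    if !pvDelim c then pvLoopA cs (buffer ++ [c])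
    else if buffer.length ≠ 0 then buffer
    else pvLoopA cs buffer

def get_tag_from_line_py (line : String) : String :=
  String.ofList (pvLoopA line.toList [])

-- ===== PORT B =====
-- re.search(r'[^ \t{%}]+', line): the first maximal run of non-delimiter characters
-- = drop the leading delimiters, then take the run of non-delimiters; '' if no match.
-- Exact, hand-written port of this regex search.
def get_tag_from_line_py_alt (line : String) : String :=
  String.ofList ((line.toList.dropWhile pvDelim).takeWhile (fun c => !pvDelim c))

-- ===== PRECONDITION & SPEC =====
def Spec_get_tag_from_line_py (line : String) (out : String) : Prop := out = get_tag_from_line_py_alt line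
instance (line : String) (out : String) : Decidable (Spec_get_tag_from_line_py line out) := by unfold Spec_get_tag_from_line_py; infer_instance

-- ===== CLAIM (what is proved, stated in full; the proofs are below) =====
def Claim_equal_get_tag_from_line_py : Prop := ∀ (line : String), Dom_get_tag_from_line_py line → Spec_get_tag_from_line_py line (get_tag_from_line_py line)

-- ===== LEMMAS AND PROOFS =====

-- once the buffer is nonempty, A's loop appends the remaining run of non-delimiters
theorem pvLoopA_nonempty (cs : List Char) :
    ∀ buffer : List Char, buffer ≠ [] →
      pvLoopA cs buffer = buffer ++ cs.takeWhile (fun c => !pvDelim c) := by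
  induction cs with
  | nil => intro buffer _; simp [pvLoopA]
  | cons c cs ih =>
    intro buffer hb
    by_cases hd : pvDelim c
    · simp [pvLoopA, hd, List.takeWhile, List.length_eq_zero_iff, hb]
    · simp only [pvLoopA, hd, Bool.not_false, if_pos]
      rw [ih (buffer ++ [c]) (by simp), List.takeWhile]
      simp [hd]

-- with an empty buffer, A's loop is dropWhile-then-takeWhile
theorem pvLoopA_empty (cs : List Char) :
    pvLoopA cs [] = (cs.dropWhile pvDelim).takeWhile (fun c => !pvDelim c) := by
  induction cs with
  | nil => simp [pvLoopA]
  | cons c cs ih =>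
    by_cases hd : pvDelim c
    · simp [pvLoopA, hd, List.dropWhile, ih]
    · simp only [pvLoopA, hd, Bool.not_false, if_pos, List.nil_append]
      rw [pvLoopA_nonempty cs [c] (by simp), List.dropWhile]
      simp [hd]

-- ===== VERDICT (by name: the statement is the Claim_ definition above) =====
theorem get_tag_from_line_py_spec : Claim_equal_get_tag_from_line_py := by
  intro line _
  unfold Spec_get_tag_from_line_py get_tag_from_line_py get_tag_from_line_py_alt
  rw [pvLoopA_empty]
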